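-- pv_equiv track=rewrite | github.com/Vsevolod91/homework-42d | Task_2.py | row_sum_of_pyramid_2
-- ===== SOURCE A (Python) =====
-- from functools import reduce
--
-- def row_sum_of_pyramid_2(num_row):
--     numbers = (x for x in range(1, 1_000_000_000) if x % 2 != 0)
--     quantity = reduce(lambda x, y: x + y, [x for x in range(1, num_row)])
--
--     sum = 0
--     for i in range(1, quantity + num_row + 1):
--         if i <= quantity:
--             next(numbers)
--             continue
--         sum += next(numbers)
--
--     return sum
-- ===== SOURCE B (Python) =====
-- def row_sum_of_pyramid_2(num_row):
--     # Row num_row of the odd-number pyramid sums to num_row**3 (closed form).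
--     return num_row ** 3
-- ===== Notes on version B (the rewrite author's own statement) =====
-- stated objective: faster
-- what changed: Replaces the quadratic generator-skipping loop (skip n(n-1)/2 odds, then sum the next n) by the closed form num_row**3.
import Mathlib
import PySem

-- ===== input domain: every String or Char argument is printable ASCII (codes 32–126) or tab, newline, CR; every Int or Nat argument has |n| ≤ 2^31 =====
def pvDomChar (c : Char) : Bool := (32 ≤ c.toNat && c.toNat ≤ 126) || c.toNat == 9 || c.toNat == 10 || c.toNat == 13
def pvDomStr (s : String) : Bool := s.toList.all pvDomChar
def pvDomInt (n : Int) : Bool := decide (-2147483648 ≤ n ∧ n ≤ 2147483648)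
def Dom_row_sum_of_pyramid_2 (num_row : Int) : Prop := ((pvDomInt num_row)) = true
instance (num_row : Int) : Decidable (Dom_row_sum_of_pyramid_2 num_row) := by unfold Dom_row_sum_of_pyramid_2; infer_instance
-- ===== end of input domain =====

-- B replaces A's quadratic generator-skipping loop by the closed form num_row ** 3 (objective: faster).

-- ===== PORT A =====
-- The generator 'numbers' yields the odd numbers 1,3,5,…; we model its state by a
-- counter k (calls of next() so far), the k-th call returning 2*k+1 (0-based).
def row_sum_of_pyramid_2 (num_row : Int) : Int :=
  -- reduce over [1, …, num_row-1]; Python raises TypeError when the list is empty (excluded by Pre_)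
  let quantity : Int := (PySem.List.pyRange 1 num_row 1).foldl (· + ·) 0
  let st : Int × Int :=
    (PySem.List.pyRange 1 (quantity + num_row + 1) 1).foldl
      (fun (st : Int × Int) i =>
        if i ≤ quantity then (st.1 + 1, st.2)              -- next(numbers); continue
        else (st.1 + 1, st.2 + (2 * st.1 + 1)))            -- sum += next(numbers)
      (0, 0)
  st.2

-- ===== PORT B =====
def row_sum_of_pyramid_2_alt (num_row : Int) : Int := num_row ^ 3

-- ===== PRECONDITION & SPEC =====
-- A raises TypeError for num_row ≤ 1 (reduce over an empty list) and StopIteration for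
-- num_row ≥ 31623 (the range(1,10^9)-bounded odd generator runs out); Pre_ excludes exactly those.
def Pre_row_sum_of_pyramid_2 (num_row : Int) : Prop := 2 ≤ num_row ∧ num_row ≤ 31622
instance (num_row : Int) : Decidable (Pre_row_sum_of_pyramid_2 num_row) := by unfold Pre_row_sum_of_pyramid_2; infer_instance
def pvWitness_row_sum_of_pyramid_2 : Int := 5

def Spec_row_sum_of_pyramid_2 (num_row : Int) (out : Int) : Prop := out = row_sum_of_pyramid_2_alt num_row
instance (num_row : Int) (out : Int) : Decidable (Spec_row_sum_of_pyramid_2 num_row out) := by unfold Spec_row_sum_of_pyramid_2; infer_instance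

-- ===== CLAIM (what is proved, stated in full; the proofs are below) =====
def Claim_equal_row_sum_of_pyramid_2 : Prop := ∀ (num_row : Int), Dom_row_sum_of_pyramid_2 num_row → Pre_row_sum_of_pyramid_2 num_row → Spec_row_sum_of_pyramid_2 num_row (row_sum_of_pyramid_2 num_row)

-- ===== LEMMAS AND PROOFS =====

-- Gauss sum of range via foldl: 2 * foldl(+) over [a, a+k) equals 2*acc + k*(2a+k-1)
theorem pvSumRange (k : Nat) : ∀ (a acc : Int),
    2 * ((PySem.List.pyRange a (a + k) 1).foldl (· + ·) acc) = 2 * acc + k * (2 * a + k - 1) := by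
  induction k with
  | zero => intro a acc; simp [PySem.List.pyRange_one_eq_nil (le_refl a)]
  | succ m ih =>
    intro a acc
    have h : a ≤ a + (m : Int) := by omega
    have : PySem.List.pyRange a (a + ((m : Int) + 1)) 1
        = PySem.List.pyRange a (a + m) 1 ++ [a + m] := by
      have := PySem.List.pyRange_one_succ_right (a := a) (b := a + m) h
      simpa [add_assoc] using this
    rw [show ((m + 1 : Nat) : Int) = (m : Int) + 1 by push_cast; ring, this,
      List.foldl_append]
    simp only [List.foldl_cons, List.foldl_nil]
    have h3 := ih a acc
    push_cast at h3 ⊢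
    linear_combination h3

def pvStep (q : Int) : Int × Int → Int → Int × Int :=
  fun st i => if i ≤ q then (st.1 + 1, st.2) else (st.1 + 1, st.2 + (2 * st.1 + 1))

-- Phase 1: over a range of elements all ≤ q, only the counter advances.
theorem pvPhase1 (q : Int) (k : Nat) : ∀ (a : Int) (st : Int × Int),
    (∀ i ∈ PySem.List.pyRange a (a + k) 1, i ≤ q) →
    (PySem.List.pyRange a (a + k) 1).foldl (pvStep q) st = (st.1 + k, st.2) := by
  induction k with
  | zero => intro a st _; simp [PySem.List.pyRange_one_eq_nil (le_refl a)]
  | succ m ih =>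
    intro a st hle
    have hab : a < a + ((m : Int) + 1) := by omega
    rw [show ((m + 1 : Nat) : Int) = (m : Int) + 1 by push_cast; ring] at *
    rw [PySem.List.pyRange_one_cons hab] at *
    simp only [List.foldl_cons]
    have ha : a ≤ q := hle a (by simp)
    have h2 : (a + 1) + (m : Int) = a + ((m : Int) + 1) := by ring
    rw [pvStep, if_pos ha]
    have := ih (a + 1) (st.1 + 1, st.2) (by
      intro i hi; exact hle i (by rw [h2] at hi; simp [hi]))
    rw [h2] at this
    rw [this]
    simp; ring

-- Phase 2: over a range of m elements all > q, starting counter c, the sum gains 2*m*c + m².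
theorem pvPhase2 (q : Int) (m : Nat) : ∀ (a : Int) (st : Int × Int),
    (∀ i ∈ PySem.List.pyRange a (a + m) 1, q < i) →
    (PySem.List.pyRange a (a + m) 1).foldl (pvStep q) st
      = (st.1 + m, st.2 + 2 * m * st.1 + m * m) := by
  induction m with
  | zero => intro a st _; simp [PySem.List.pyRange_one_eq_nil (le_refl a)]
  | succ m ih =>
    intro a st hgt
    have hab : a < a + ((m : Int) + 1) := by omega
    rw [show ((m + 1 : Nat) : Int) = (m : Int) + 1 by push_cast; ring] at *
    rw [PySem.List.pyRange_one_cons hab] at *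
    simp only [List.foldl_cons]
    have ha : q < a := hgt a (by simp)
    have h2 : (a + 1) + (m : Int) = a + ((m : Int) + 1) := by ring
    rw [pvStep, if_neg (by omega)]
    have := ih (a + 1) (st.1 + 1, st.2 + (2 * st.1 + 1)) (by
      intro i hi; exact hgt i (by rw [h2] at hi; simp [hi]))
    rw [h2] at this
    rw [this]
    simp only [Prod.mk.injEq]
    constructor <;> ring

-- ===== VERDICT (by name: the statement is the Claim_ definition above) =====
theorem row_sum_of_pyramid_2_spec : Claim_equal_row_sum_of_pyramid_2 := by
  intro n _ hpre
  obtain ⟨h2, _⟩ := hpre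
  unfold Spec_row_sum_of_pyramid_2 row_sum_of_pyramid_2 row_sum_of_pyramid_2_alt
  set q : Int := (PySem.List.pyRange 1 n 1).foldl (· + ·) 0 with hq
  have hq2 : 2 * q = (n - 1) * n := by
    have := pvSumRange (n - 1).toNat 1 0
    rw [show (1 : Int) + ((n-1).toNat : Int) = n by omega] at this
    rw [hq, this]
    have : (((n-1).toNat : Int)) = n - 1 := by omega
    rw [this]; ring
  have hq1 : 1 ≤ q := by nlinarith
  -- split the main loop range at q+1
  have hsplit : PySem.List.pyRange 1 (q + n + 1) 1
      = PySem.List.pyRange 1 (q + 1) 1 ++ PySem.List.pyRange (q + 1) (q + n + 1) 1 :=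
    PySem.List.pyRange_one_append 1 (q + 1) (q + n + 1) (by omega) (by omega)
  have e1 : (PySem.List.pyRange 1 (q + 1) 1).foldl (pvStep q) (0, 0) = (q, 0) := by
    have h := pvPhase1 q q.toNat 1 (0, 0) (by
      intro i hi
      rw [show (1 : Int) + (q.toNat : Int) = q + 1 by omega] at hi
      have := (PySem.List.mem_pyRange_one).mp hi; omega)
    rw [show (1 : Int) + (q.toNat : Int) = q + 1 by omega] at h
    rw [h]; simp; omega
  have e2 : (PySem.List.pyRange (q + 1) (q + n + 1) 1).foldl (pvStep q) (q, 0)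
      = (q + n.toNat, 0 + 2 * n.toNat * q + n.toNat * n.toNat) := by
    have h := pvPhase2 q n.toNat (q + 1) (q, 0) (by
      intro i hi
      rw [show q + 1 + (n.toNat : Int) = q + n + 1 by omega] at hi
      have := (PySem.List.mem_pyRange_one).mp hi; omega)
    rw [show q + 1 + (n.toNat : Int) = q + n + 1 by omega] at h
    exact h
  have hfold : ((PySem.List.pyRange 1 (q + n + 1) 1).foldl (pvStep q) (0, 0)).2
      = 2 * n.toNat * q + n.toNat * n.toNat := by
    rw [hsplit, List.foldl_append, e1, e2]; simp
  have hn : ((n.toNat : Int)) = n := by omega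
  calc ((PySem.List.pyRange 1 (q + n + 1) 1).foldl
          (fun (st : Int × Int) i =>
            if i ≤ q then (st.1 + 1, st.2) else (st.1 + 1, st.2 + (2 * st.1 + 1))) (0, 0)).2
      = ((PySem.List.pyRange 1 (q + n + 1) 1).foldl (pvStep q) (0, 0)).2 := rfl
    _ = 2 * n.toNat * q + n.toNat * n.toNat := hfold
    _ = n ^ 3 := by rw [hn]; nlinarith
    _ = _ := rfl
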